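-- pv_equiv track=rewrite | github.com/Tofmuck/FridaDev | app/identity/identity_governance.py | summarize_regime_sections
-- ===== SOURCE A (Python) =====
-- from typing import Any, Mapping
--
-- def summarize_regime_sections(sections: list[Mapping[str, Any]]) -> dict[str, Any]:
--     safe_sections = [section for section in sections if isinstance(section, Mapping)]
--     return {
--         'regime_section_count': len(safe_sections),
--         'regime_active_readonly_count': sum(
--             1 for section in safe_sections if str(section.get('classification') or '') == 'active_readonly'
--         ),
--         'regime_doctrine_locked_count': sum(
--             1 for section in safe_sections if str(section.get('classification') or '') == 'doctrine_locked'
--         ),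
--         'regime_legacy_inactive_count': sum(
--             1 for section in safe_sections if str(section.get('classification') or '') == 'legacy_inactive'
--         ),
--     }
-- ===== SOURCE B (Python) =====
-- from typing import Any, Mapping
--
-- def summarize_regime_sections(sections: list) -> dict:
--     n = 0
--     counts = {}
--     for section in sections:
--         if isinstance(section, Mapping):
--             n += 1
--             key = str(section.get('classification') or '')
--             counts[key] = counts.get(key, 0) + 1
--     return {
--         'regime_section_count': n,
--         'regime_active_readonly_count': counts.get('active_readonly', 0),
--         'regime_doctrine_locked_count': counts.get('doctrine_locked', 0),
--         'regime_legacy_inactive_count': counts.get('legacy_inactive', 0),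
--     }
-- ===== Notes on version B (the rewrite author's own statement) =====
-- stated objective: simpler
-- what changed: Replaces four separate passes (one filter pass plus three counting scans) by a single loop that tallies normalized classification keys into a dict, with the final result read off by get-with-default lookups.
import Mathlib
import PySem

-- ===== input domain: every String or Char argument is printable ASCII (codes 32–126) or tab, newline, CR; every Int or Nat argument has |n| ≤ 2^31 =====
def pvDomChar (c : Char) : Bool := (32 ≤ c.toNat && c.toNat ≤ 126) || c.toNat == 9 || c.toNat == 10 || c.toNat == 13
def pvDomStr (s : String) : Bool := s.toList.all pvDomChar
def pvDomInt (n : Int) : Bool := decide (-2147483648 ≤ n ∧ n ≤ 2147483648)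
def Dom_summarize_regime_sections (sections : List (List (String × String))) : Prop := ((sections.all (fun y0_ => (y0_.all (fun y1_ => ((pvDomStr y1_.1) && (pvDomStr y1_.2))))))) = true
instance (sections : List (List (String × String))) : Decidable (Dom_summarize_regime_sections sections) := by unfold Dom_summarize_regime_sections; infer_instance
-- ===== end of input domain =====

-- B replaces A's four passes over the sections by one tallying loop into a dict plus default
-- lookups (objective: simpler, one pass instead of four).


-- ===== PORT A =====
-- str(section.get('classification') or ''): the values are strings, so str() is the identity and
-- 'or ''' maps a missing key or an empty value to '' — both are exactly getD with default "".
def pvCls (s : List (String × String)) : String :=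
  PySem.Dict.getD (PySem.Dict.ofList s) "classification" ""

def summarize_regime_sections (sections : List (List (String × String))) : List (String × Int) :=
  -- under the type convention every element is a Mapping, so the isinstance filter keeps all
  let safe := sections
  [("regime_section_count", (safe.length : Int)),
   ("regime_active_readonly_count",
     ((safe.filter (fun s => pvCls s == "active_readonly")).map (fun _ => (1 : Int))).sum),
   ("regime_doctrine_locked_count",
     ((safe.filter (fun s => pvCls s == "doctrine_locked")).map (fun _ => (1 : Int))).sum),
   ("regime_legacy_inactive_count",
     ((safe.filter (fun s => pvCls s == "legacy_inactive")).map (fun _ => (1 : Int))).sum)]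

-- ===== PORT B =====
def pvStep (acc : Int × PySem.Dict String Int) (s : List (String × String)) :
    Int × PySem.Dict String Int :=
  let key := PySem.Dict.getD (PySem.Dict.ofList s) "classification" ""
  (acc.1 + 1, acc.2.insert key (acc.2.getD key 0 + 1))

def summarize_regime_sections_alt (sections : List (List (String × String))) : List (String × Int) :=
  let st := sections.foldl pvStep ((0 : Int), PySem.Dict.empty)
  [("regime_section_count", st.1),
   ("regime_active_readonly_count", st.2.getD "active_readonly" 0),
   ("regime_doctrine_locked_count", st.2.getD "doctrine_locked" 0),
   ("regime_legacy_inactive_count", st.2.getD "legacy_inactive" 0)]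

-- ===== PRECONDITION & SPEC =====
def Spec_summarize_regime_sections (sections : List (List (String × String))) (out : List (String × Int)) : Prop := out = summarize_regime_sections_alt sections
instance (sections : List (List (String × String))) (out : List (String × Int)) : Decidable (Spec_summarize_regime_sections sections out) := by unfold Spec_summarize_regime_sections; infer_instance

-- ===== CLAIM (what is proved, stated in full; the proofs are below) =====
def Claim_equal_summarize_regime_sections : Prop := ∀ (sections : List (List (String × String))), Dom_summarize_regime_sections sections → Spec_summarize_regime_sections sections (summarize_regime_sections sections)

-- ===== LEMMAS AND PROOFS =====
lemma pvFold_fst (sections : List (List (String × String))) :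
    ∀ (n : Int) (d : PySem.Dict String Int),
      (sections.foldl pvStep (n, d)).1 = n + sections.length := by
  induction sections with
  | nil => simp
  | cons s t ih =>
    intro n d
    simp only [List.foldl_cons, List.length_cons]
    rw [show pvStep (n, d) s = (n + 1, _) from rfl, ih]
    push_cast; ring

lemma pvFold_getD (sections : List (List (String × String))) :
    ∀ (n : Int) (d : PySem.Dict String Int) (k : String),
      (sections.foldl pvStep (n, d)).2.getD k 0
        = d.getD k 0 + ((sections.filter (fun s => pvCls s == k)).map (fun _ => (1 : Int))).sum := by
  induction sections with
  | nil => simp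
  | cons s t ih =>
    intro n d k
    simp only [List.foldl_cons, List.filter_cons]
    rw [show t.foldl pvStep (pvStep (n, d) s)
          = t.foldl pvStep (n + 1, d.insert (pvCls s) (d.getD (pvCls s) 0 + 1)) from rfl, ih,
        PySem.Dict.getD_insert]
    by_cases h : k = pvCls s
    · simp [h]; ring
    · have h' : ¬ pvCls s = k := fun e => h e.symm
      simp [h, h']

-- ===== VERDICT (by name: the statement is the Claim_ definition above) =====
theorem summarize_regime_sections_spec : Claim_equal_summarize_regime_sections := by
  intro sections _
  simp only [Spec_summarize_regime_sections, summarize_regime_sections,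
    summarize_regime_sections_alt]
  rw [pvFold_fst, pvFold_getD, pvFold_getD, pvFold_getD]
  simp [PySem.Dict.getD, PySem.Dict.get?, PySem.Dict.empty]
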